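-- pv_equiv track=rewrite | github.com/spektrum-labs/Transformations | safeguards/claims-defense/crowdstrike/isEPPConfiguredToVendorGuidance.py | check_policy_classes
-- ===== SOURCE A (Python) =====
-- REQUIRED_CLASS_IDS = [
--     "MACHINE_LEARNING",
--     "EXPLOIT_MITIGATION",
--     "BEHAVIORAL_ANALYSIS",
--     "PROCESS_BLOCKING"
-- ]
--
-- ACCEPTABLE_MODES = ["ENABLED", "AGGRESSIVE"]
--
-- def check_policy_classes(policy):
--     settings = policy.get("prevention_settings", policy.get("settings", {}))
--     if not isinstance(settings, dict):
--         settings = {}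
--     classes = settings.get("classes", [])
--     if not isinstance(classes, list):
--         classes = []
--     found_ids = {}
--     for cls in classes:
--         if not isinstance(cls, dict):
--             continue
--         class_id = cls.get("id", "")
--         mode = cls.get("prevention_mode", cls.get("mode", "DISABLED"))
--         if not isinstance(mode, str):
--             mode = "DISABLED"
--         found_ids[class_id] = mode.upper()
--     missing = []
--     non_compliant = []
--     compliant = []
--     for req_id in REQUIRED_CLASS_IDS:
--         if req_id not in found_ids:
--             missing.append(req_id)
--         elif found_ids[req_id] not in ACCEPTABLE_MODES:
--             non_compliant.append(req_id + " (mode: " + found_ids[req_id] + ")")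
--         else:
--             compliant.append(req_id + " (mode: " + found_ids[req_id] + ")")
--     is_compliant = len(missing) == 0 and len(non_compliant) == 0
--     return is_compliant, compliant, non_compliant, missing
-- ===== SOURCE B (Python) =====
-- REQUIRED_CLASS_IDS = [
--     "MACHINE_LEARNING",
--     "EXPLOIT_MITIGATION",
--     "BEHAVIORAL_ANALYSIS",
--     "PROCESS_BLOCKING"
-- ]
--
-- ACCEPTABLE_MODES = ["ENABLED", "AGGRESSIVE"]
--
-- def check_policy_classes(policy):
--     settings = policy.get("prevention_settings", policy.get("settings", {}))
--     if not isinstance(settings, dict):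
--         settings = {}
--     classes = settings.get("classes", [])
--     if not isinstance(classes, list):
--         classes = []
--
--     def mode_of(req_id):
--         # back-to-front first match = last matching entry wins
--         for cls in reversed(classes):
--             if isinstance(cls, dict) and cls.get("id", "") == req_id:
--                 m = cls.get("prevention_mode", cls.get("mode", "DISABLED"))
--                 return (m if isinstance(m, str) else "DISABLED").upper()
--         return None
--
--     statuses = [(r, mode_of(r)) for r in REQUIRED_CLASS_IDS]
--     missing = [r for r, m in statuses if m is None]
--     non_compliant = [r + " (mode: " + m + ")" for r, m in statuses
--                      if m is not None and m not in ACCEPTABLE_MODES]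
--     compliant = [r + " (mode: " + m + ")" for r, m in statuses
--                  if m is not None and m in ACCEPTABLE_MODES]
--     return not missing and not non_compliant, compliant, non_compliant, missing
-- ===== Notes on version B (the rewrite author's own statement) =====
-- stated objective: alternative
-- what changed: Replaces A's dict-building pass plus classifying fold with a reversed-scan first-match lookup per required id and three comprehension-style staged passes that build missing/non_compliant/compliant directly.
import Mathlib
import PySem

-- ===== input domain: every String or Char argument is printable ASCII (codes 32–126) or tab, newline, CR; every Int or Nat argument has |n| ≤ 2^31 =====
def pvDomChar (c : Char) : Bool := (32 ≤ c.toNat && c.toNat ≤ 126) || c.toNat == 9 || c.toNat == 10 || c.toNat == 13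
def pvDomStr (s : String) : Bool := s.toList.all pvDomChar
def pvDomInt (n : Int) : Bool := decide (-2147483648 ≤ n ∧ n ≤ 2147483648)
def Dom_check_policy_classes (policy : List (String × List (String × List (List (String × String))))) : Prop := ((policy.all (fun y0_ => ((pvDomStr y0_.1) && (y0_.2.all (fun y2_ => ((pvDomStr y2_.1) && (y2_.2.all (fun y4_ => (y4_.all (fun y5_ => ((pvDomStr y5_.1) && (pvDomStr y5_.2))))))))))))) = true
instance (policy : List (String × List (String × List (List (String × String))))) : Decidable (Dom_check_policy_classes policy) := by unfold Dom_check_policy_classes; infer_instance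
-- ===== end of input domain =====

-- B replaces A's dict-building pass + classifying fold with a reversed-scan first-match
-- lookup per required id and three staged comprehension passes (alternative decomposition).
-- The Python isinstance guards are vacuous under the typed domain (settings is always a dict,
-- classes a list, cls a dict, mode a str), so they have no Lean counterpart.

def REQUIRED_CLASS_IDS : List String :=
  ["MACHINE_LEARNING", "EXPLOIT_MITIGATION", "BEHAVIORAL_ANALYSIS", "PROCESS_BLOCKING"]

def ACCEPTABLE_MODES : List String := ["ENABLED", "AGGRESSIVE"]

-- cls.get("id", "")   (shared id/mode extraction, textually identical in both Pythons)
def pvClsId (cls : List (String × String)) : String :=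
  ((PySem.Dict.mk cls).get? "id").getD ""

-- cls.get("prevention_mode", cls.get("mode", "DISABLED")).upper()
def pvClsMode (cls : List (String × String)) : String :=
  PySem.Str.upper (((PySem.Dict.mk cls).get? "prevention_mode").getD
    (((PySem.Dict.mk cls).get? "mode").getD "DISABLED"))

-- ===== PORT A =====
def check_policy_classes (policy : List (String × List (String × List (List (String × String))))) : Bool × List String × List String × List String :=
  let settings := ((PySem.Dict.mk policy).get? "prevention_settings").getD
      (((PySem.Dict.mk policy).get? "settings").getD [])
  let classes := ((PySem.Dict.mk settings).get? "classes").getD []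
  let found_ids : PySem.Dict String String :=
    classes.foldl (fun d cls => d.insert (pvClsId cls) (pvClsMode cls)) PySem.Dict.empty
  -- acc = (missing, non_compliant, compliant); 'req_id not in found_ids' / found_ids[req_id] as a match on get?
  let res := REQUIRED_CLASS_IDS.foldl
    (fun (acc : List String × List String × List String) req =>
      match found_ids.get? req with
      | none => (acc.1 ++ [req], acc.2.1, acc.2.2)
      | some m =>
        if m ∉ ACCEPTABLE_MODES then (acc.1, acc.2.1 ++ [req ++ " (mode: " ++ m ++ ")"], acc.2.2)
        else (acc.1, acc.2.1, acc.2.2 ++ [req ++ " (mode: " ++ m ++ ")"]))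
    ([], [], [])
  (res.1.length == 0 && res.2.1.length == 0, res.2.2, res.2.1, res.1)

-- ===== PORT B =====
-- mode_of: first match scanning the reversed list (= last matching entry)
def pvModeOf (classes : List (List (String × String))) (req : String) : Option String :=
  (classes.reverse.find? (fun cls => pvClsId cls == req)).map pvClsMode

def check_policy_classes_alt (policy : List (String × List (String × List (List (String × String))))) : Bool × List String × List String × List String :=
  let settings := ((PySem.Dict.mk policy).get? "prevention_settings").getD
      (((PySem.Dict.mk policy).get? "settings").getD [])
  let classes := ((PySem.Dict.mk settings).get? "classes").getD []
  let statuses := REQUIRED_CLASS_IDS.map (fun r => (r, pvModeOf classes r))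
  let missing := (statuses.filter (fun p => p.2.isNone)).map Prod.fst
  let non_compliant := statuses.filterMap (fun p =>
    match p.2 with
    | some m => if m ∉ ACCEPTABLE_MODES then some (p.1 ++ " (mode: " ++ m ++ ")") else none
    | none => none)
  let compliant := statuses.filterMap (fun p =>
    match p.2 with
    | some m => if m ∈ ACCEPTABLE_MODES then some (p.1 ++ " (mode: " ++ m ++ ")") else none
    | none => none)
  (missing.isEmpty && non_compliant.isEmpty, compliant, non_compliant, missing)

-- ===== PRECONDITION & SPEC =====
def Spec_check_policy_classes (policy : List (String × List (String × List (List (String × String))))) (out : Bool × List String × List String × List String) : Prop := out = check_policy_classes_alt policy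
instance (policy : List (String × List (String × List (List (String × String))))) (out : Bool × List String × List String × List String) : Decidable (Spec_check_policy_classes policy out) := by unfold Spec_check_policy_classes; infer_instance

-- ===== CLAIM (what is proved, stated in full; the proofs are below) =====
def Claim_equal_check_policy_classes : Prop := ∀ (policy : List (String × List (String × List (List (String × String))))), Dom_check_policy_classes policy → Spec_check_policy_classes policy (check_policy_classes policy)

-- ===== LEMMAS AND PROOFS =====

-- A's dict lookup equals B's reversed-scan first match.
lemma pv_get_fold_insert (classes : List (List (String × String))) (req : String) :
    ∀ (d : PySem.Dict String String),
      (classes.foldl (fun d cls => d.insert (pvClsId cls) (pvClsMode cls)) d).get? req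
        = (pvModeOf classes req).orElse (fun _ => d.get? req) := by
  induction classes with
  | nil => intro d; simp [pvModeOf]
  | cons c cs ih =>
    intro d
    simp only [List.foldl_cons, ih]
    unfold pvModeOf
    rw [List.reverse_cons, List.find?_append]
    cases hf : cs.reverse.find? (fun cls => pvClsId cls == req) with
    | some v => simp [Option.orElse]
    | none =>
      by_cases hc : pvClsId c = req
      · subst hc; simp [Option.orElse, PySem.Dict.get?_insert_self]
      · rw [PySem.Dict.get?_insert_of_ne _ _ (fun e => hc e.symm)]
        simp [Option.orElse, hc]

-- A's classifying fold over any list of required ids equals B's staged passes,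
-- modulo the accumulator prefix.
lemma pv_fold_eq (classes : List (List (String × String))) :
    ∀ (reqs : List String) (acc : List String × List String × List String),
      reqs.foldl
        (fun (acc : List String × List String × List String) req =>
          match (classes.foldl (fun d cls => d.insert (pvClsId cls) (pvClsMode cls))
              PySem.Dict.empty).get? req with
          | none => (acc.1 ++ [req], acc.2.1, acc.2.2)
          | some m =>
            if m ∉ ACCEPTABLE_MODES then (acc.1, acc.2.1 ++ [req ++ " (mode: " ++ m ++ ")"], acc.2.2)
            else (acc.1, acc.2.1, acc.2.2 ++ [req ++ " (mode: " ++ m ++ ")"])) acc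
      = (acc.1 ++ (((reqs.map (fun r => (r, pvModeOf classes r))).filter
            (fun p => p.2.isNone)).map Prod.fst),
         acc.2.1 ++ ((reqs.map (fun r => (r, pvModeOf classes r))).filterMap (fun p =>
            match p.2 with
            | some m => if m ∉ ACCEPTABLE_MODES then some (p.1 ++ " (mode: " ++ m ++ ")") else none
            | none => none)),
         acc.2.2 ++ ((reqs.map (fun r => (r, pvModeOf classes r))).filterMap (fun p =>
            match p.2 with
            | some m => if m ∈ ACCEPTABLE_MODES then some (p.1 ++ " (mode: " ++ m ++ ")") else none
            | none => none))) := by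
  intro reqs
  induction reqs with
  | nil => intro acc; simp
  | cons r rs ih =>
    intro acc
    simp only [List.foldl_cons, List.map_cons, List.filter_cons, List.filterMap_cons]
    rw [pv_get_fold_insert classes r PySem.Dict.empty]
    cases hm : pvModeOf classes r with
    | none => rw [ih]; simp [Option.orElse]
    | some m =>
      by_cases hmem : m ∈ ACCEPTABLE_MODES
      · rw [ih]; simp [Option.orElse, hmem]
      · rw [ih]; simp [Option.orElse, hmem]

lemma pv_len_zero (l : List String) : (l.length == 0) = l.isEmpty := by
  cases l <;> simp

lemma pv_main_eq (policy : List (String × List (String × List (List (String × String))))) :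
    check_policy_classes policy = check_policy_classes_alt policy := by
  unfold check_policy_classes check_policy_classes_alt
  simp only [pv_fold_eq, pv_len_zero, List.nil_append]

-- ===== VERDICT (by name: the statement is the Claim_ definition above) =====
theorem check_policy_classes_spec : Claim_equal_check_policy_classes := by
  intro policy _
  exact pv_main_eq policy
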